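-- pv_equiv track=rewrite | github.com/zhihongqiyuan/EonOS-Openharmony | OpenHarmony/arkcompiler/ets_frontend/ets2panda/public/headers_parser/text_tools.py | rfind_first_of_characters
-- ===== SOURCE A (Python) =====
-- def rfind_first_of_characters(characters: str, data: str, pos: int, pos_end: int = 0) -> int:
--     """pos_end includes in searching"""
--     if pos > len(data):
--         pos = len(data) - 1
--     while pos >= max(0, pos_end):
--         if data[pos] in characters:
--             return pos
--         pos -= 1
--     return len(data)
-- ===== SOURCE B (Python) =====
-- def rfind_first_of_characters(characters: str, data: str, pos: int, pos_end: int = 0) -> int: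
--     """pos_end includes in searching"""
--     if pos > len(data):
--         pos = len(data) - 1
--     result = len(data)
--     for i in range(max(0, pos_end), pos + 1):
--         if data[i] in characters:
--             result = i
--     return result
-- ===== Notes on version B (the rewrite author's own statement) =====
-- stated objective: alternative
-- what changed: Replaced the backward while-loop with early return by a single forward for-loop over range(max(0,pos_end), pos+1) that keeps overwriting an accumulator with the latest matching index, so the last overwrite is the highest match.
-- outside the precondition, e.g. on rfind_first_of_characters('a', 'ab', 2, 0): A raises IndexError, B raises IndexError
import Mathlib
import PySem

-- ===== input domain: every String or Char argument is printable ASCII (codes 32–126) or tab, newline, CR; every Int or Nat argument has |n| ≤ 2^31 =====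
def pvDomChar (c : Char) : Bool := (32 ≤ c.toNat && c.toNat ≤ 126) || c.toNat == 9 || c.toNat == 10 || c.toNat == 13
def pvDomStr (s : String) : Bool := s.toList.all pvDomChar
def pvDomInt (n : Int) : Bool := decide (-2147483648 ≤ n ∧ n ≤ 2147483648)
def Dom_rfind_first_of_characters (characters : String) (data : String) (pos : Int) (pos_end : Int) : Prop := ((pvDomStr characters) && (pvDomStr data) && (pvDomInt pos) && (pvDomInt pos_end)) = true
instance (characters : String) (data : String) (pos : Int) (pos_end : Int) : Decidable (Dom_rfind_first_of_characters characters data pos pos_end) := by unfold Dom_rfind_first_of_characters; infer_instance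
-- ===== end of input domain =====

-- B replaces A's backward early-return while-loop by a forward scan that keeps
-- overwriting an accumulator with the latest matching index (objective: alternative).

-- ===== PORT A =====
-- the 'while pos >= max(0, pos_end)' loop; fuel is the exact iteration count,
-- fuel 0 coincides with the loop's normal exit ('return len(data)').
-- data[pos] is ported with pyGetD (Pre_ excludes the IndexError inputs).
def pvRfindLoopA (cs ds : List Char) (lo : Int) : Nat → Int → Int
  | 0, _ => (ds.length : Int)
  | Nat.succ fuel, pos =>
    if lo ≤ pos then
      if cs.contains (PySem.List.pyGetD ds pos ' ') then pos
      else pvRfindLoopA cs ds lo fuel (pos - 1)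
    else (ds.length : Int)

def rfind_first_of_characters (characters : String) (data : String) (pos : Int) (pos_end : Int) : Int :=
  let ds := data.toList
  let len : Int := ds.length
  let pos := if pos > len then len - 1 else pos
  let lo := max 0 pos_end
  pvRfindLoopA characters.toList ds lo (pos - lo + 1).toNat pos

-- ===== PORT B =====
def rfind_first_of_characters_alt (characters : String) (data : String) (pos : Int) (pos_end : Int) : Int :=
  let ds := data.toList
  let len : Int := ds.length
  let pos := if pos > len then len - 1 else pos
  (PySem.List.pyRange (max 0 pos_end) (pos + 1) 1).foldl
    (fun result i => if characters.toList.contains (PySem.List.pyGetD ds i ' ') then i else result) len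

-- ===== PRECONDITION & SPEC =====
-- Pre_ excludes exactly the inputs where A (and B) raise IndexError:
-- pos == len(data) (unadjusted) with the loop entered, i.e. pos_end ≤ pos.
def Pre_rfind_first_of_characters (characters : String) (data : String) (pos : Int) (pos_end : Int) : Prop :=
  ¬ (pos = (data.toList.length : Int) ∧ pos_end ≤ pos)
instance (characters : String) (data : String) (pos : Int) (pos_end : Int) : Decidable (Pre_rfind_first_of_characters characters data pos pos_end) := by unfold Pre_rfind_first_of_characters; infer_instance

def pvWitness_rfind_first_of_characters : String × String × Int × Int := ("a", "abc", 2, 0)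

def Spec_rfind_first_of_characters (characters : String) (data : String) (pos : Int) (pos_end : Int) (out : Int) : Prop := out = rfind_first_of_characters_alt characters data pos pos_end
instance (characters : String) (data : String) (pos : Int) (pos_end : Int) (out : Int) : Decidable (Spec_rfind_first_of_characters characters data pos pos_end out) := by unfold Spec_rfind_first_of_characters; infer_instance

-- ===== CLAIM (what is proved, stated in full; the proofs are below) =====
def Claim_equal_rfind_first_of_characters : Prop := ∀ (characters : String) (data : String) (pos : Int) (pos_end : Int), Dom_rfind_first_of_characters characters data pos pos_end → Pre_rfind_first_of_characters characters data pos pos_end → Spec_rfind_first_of_characters characters data pos pos_end (rfind_first_of_characters characters data pos pos_end)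

-- ===== LEMMAS AND PROOFS =====

-- The backward early-return loop equals the forward last-overwrite fold,
-- provided every index lo..pos is in range.
theorem pvRfindLoop_eq_fold (cs ds : List Char) (lo : Int) :
    ∀ (n : Nat) (pos : Int), (pos - lo + 1).toNat = n → pos < (ds.length : Int) →
    pvRfindLoopA cs ds lo n pos =
      (PySem.List.pyRange lo (pos + 1) 1).foldl
        (fun result i => if cs.contains (PySem.List.pyGetD ds i ' ') then i else result)
        (ds.length : Int) := by
  intro n
  induction n with
  | zero =>
    intro pos hn _
    have h : pos + 1 ≤ lo := by omega
    rw [PySem.List.pyRange_one_eq_nil h]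
    rfl
  | succ k ih =>
    intro pos hn hlt
    have hge : lo ≤ pos := by omega
    rw [PySem.List.pyRange_one_succ_right (by omega : lo ≤ pos)]
    rw [List.foldl_append]
    simp only [List.foldl_cons, List.foldl_nil]
    show (if lo ≤ pos then
            if cs.contains (PySem.List.pyGetD ds pos ' ') then pos
            else pvRfindLoopA cs ds lo k (pos - 1)
          else (ds.length : Int)) = _
    rw [if_pos hge]
    by_cases hc : cs.contains (PySem.List.pyGetD ds pos ' ')
    · rw [if_pos hc, if_pos hc]
    · rw [if_neg hc, if_neg hc]
      have := ih (pos - 1) (by omega) (by omega)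
      rw [this]
      norm_num

-- ===== VERDICT (by name: the statement is the Claim_ definition above) =====
theorem rfind_first_of_characters_spec : Claim_equal_rfind_first_of_characters := by
  intro characters data pos pos_end _ hpre
  unfold Spec_rfind_first_of_characters rfind_first_of_characters rfind_first_of_characters_alt
  simp only []
  set ds := data.toList with hds
  set len : Int := (ds.length : Int) with hlen
  set lo : Int := max 0 pos_end with hlo
  by_cases hgt : pos > len
  · rw [if_pos hgt]
    exact pvRfindLoop_eq_fold characters.toList ds lo _ (len - 1) rfl (by omega)
  · rw [if_neg hgt]
    by_cases heq : pos = len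
    · -- excluded unless pos_end > pos: then the loop never runs and the range is empty
      have hpe : pos < pos_end := by
        unfold Pre_rfind_first_of_characters at hpre
        by_contra h
        exact hpre ⟨heq, by omega⟩
      have hlolt : pos + 1 ≤ lo := by
        rw [hlo]; omega
      rw [PySem.List.pyRange_one_eq_nil hlolt]
      have hfuel : (pos - lo + 1).toNat = 0 := by omega
      rw [hfuel]
      rfl
    · exact pvRfindLoop_eq_fold characters.toList ds lo _ pos rfl (by omega)
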